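-- pv_equiv track=rewrite | github.com/ChloeNogueira/TodoApp | Flask-API-master/app/resources/account.py | getFirstMissingID
-- ===== SOURCE A (Python) =====
-- def getFirstMissingID(ids) -> int:
--     j = 0
--     ids.sort()
--     for i in range(0,len(ids)):
--         if ids[i] == j :
--             j += 1
--         else:
--             break
--     return j
-- ===== SOURCE B (Python) =====
-- def getFirstMissingID(ids) -> int:
--     # Repeatedly take the smallest remaining id; as long as it is exactly the
--     # next expected id (0, 1, 2, ...), consume it and move on.
--     remaining = list(ids)
--     j = 0
--     while remaining:
--         smallest = min(remaining)
--         if smallest != j: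
--             break
--         remaining.remove(smallest)
--         j += 1
--     return j
-- ===== Notes on version B (the rewrite author's own statement) =====
-- stated objective: alternative
-- what changed: Replaced sort-then-scan with repeated min-selection: take the smallest remaining id while it equals the next expected id; no sort, and unlike A it does not mutate its argument.
import Mathlib
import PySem

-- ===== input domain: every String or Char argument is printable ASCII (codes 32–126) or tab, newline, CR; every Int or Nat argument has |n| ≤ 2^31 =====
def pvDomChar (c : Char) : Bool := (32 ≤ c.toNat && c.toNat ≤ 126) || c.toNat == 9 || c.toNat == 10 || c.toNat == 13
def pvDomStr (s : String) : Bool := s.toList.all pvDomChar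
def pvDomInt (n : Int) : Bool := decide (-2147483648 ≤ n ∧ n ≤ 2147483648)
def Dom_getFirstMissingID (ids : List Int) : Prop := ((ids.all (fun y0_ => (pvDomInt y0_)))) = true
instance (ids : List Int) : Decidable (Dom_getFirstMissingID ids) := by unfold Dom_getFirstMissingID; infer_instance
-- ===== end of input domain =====

-- B replaces A's sort-then-scan with repeated min-selection over the remaining ids (an alternative algorithm, not faster);
-- A sorts its argument in place while B does not mutate it — the equivalence proved here is about the return value only.

-- ===== PORT A =====
-- A's loop over the sorted list with counter j, breaking at the first mismatch.
def pvLoopA : List Int → Int → Int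
  | [], j => j
  | x :: rest, j => if x = j then pvLoopA rest (j + 1) else j

def getFirstMissingID (ids : List Int) : Int :=
  pvLoopA (PySem.List.sorted ids (fun x => x) false) 0

-- ===== PORT B =====
-- B's while loop: while remaining is nonempty, take its min; stop unless it equals j,
-- else remove one occurrence and continue with j+1.  (The .getD defaults are totality
-- guards only: min? of a nonempty list is always some, and remove? of a member is always some.)
def pvLoopB : List Int → Int → Int
  | [], j => j
  | x :: rest, j =>
      let smallest := (PySem.List.min? (x :: rest) (fun y => y)).getD 0
      if smallest ≠ j then j
      else pvLoopB ((PySem.List.remove? (x :: rest) smallest).getD rest) (j + 1)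
termination_by l _ => l.length
decreasing_by
  rcases h : PySem.List.remove? (x :: rest) smallest with _ | l'
  · simp
  · have hmem : smallest ∈ (x :: rest) := by
      by_contra hn
      rw [(PySem.List.remove?_eq_none_iff _ _).mpr hn] at h
      simp at h
    rw [PySem.List.remove?_eq_some_erase _ _ hmem] at h
    simp only [Option.some.injEq] at h
    subst h
    simp only [Option.getD_some, List.length_erase_of_mem hmem, List.length_cons]
    omega

def getFirstMissingID_alt (ids : List Int) : Int :=
  pvLoopB ids 0

-- ===== PRECONDITION & SPEC =====
def Spec_getFirstMissingID (ids : List Int) (out : Int) : Prop := out = getFirstMissingID_alt ids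
instance (ids : List Int) (out : Int) : Decidable (Spec_getFirstMissingID ids out) := by unfold Spec_getFirstMissingID; infer_instance

-- ===== CLAIM =====
def Claim_equal_getFirstMissingID : Prop := ∀ (ids : List Int), Dom_getFirstMissingID ids → Spec_getFirstMissingID ids (getFirstMissingID ids)

-- ===== LEMMAS AND PROOFS =====

-- Sorting a nonempty list puts its minimum first, followed by the sorted remainder with
-- one occurrence of the minimum removed.
theorem sorted_cons_min (l : List Int) (m : Int)
    (hmin : PySem.List.min? l (fun y => y) = some m) :
    PySem.List.sorted l (fun x => x) false = m :: PySem.List.sorted (l.erase m) (fun x => x) false := by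
  have hperm : (PySem.List.sorted l (fun x => x) false).Perm l := PySem.List.sorted_perm l _ false
  have hm_mem : m ∈ l := PySem.List.min?_mem hmin
  have hne : PySem.List.sorted l (fun x => x) false ≠ [] := by
    intro hnil
    rw [hnil] at hperm
    rw [← hperm.nil_eq] at hm_mem
    simp at hm_mem
  obtain ⟨h, t, hs⟩ := List.exists_cons_of_ne_nil hne
  have hhm : h = m := by
    have hh_mem : h ∈ l := by
      have : h ∈ PySem.List.sorted l (fun x => x) false := by rw [hs]; exact List.mem_cons_self
      exact hperm.mem_iff.mp this
    have h1 : m ≤ h := PySem.List.min?_isMin hmin h hh_mem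
    have h2 : h ≤ m := PySem.List.key_head_sorted_le l (fun x => x) hs m hm_mem
    omega
  subst hhm
  have hpair : (h :: t).Pairwise (fun a b => (a : Int) ≤ b) := by
    have := PySem.List.sorted_pairwise l (fun x : Int => x)
    rwa [hs] at this
  have htperm : t.Perm (l.erase h) := by
    have h1 : (h :: t).Perm l := by rw [← hs]; exact hperm
    have h2 : ((h :: t).erase h).Perm (l.erase h) := h1.erase h
    simpa using h2
  rw [hs, PySem.List.sorted_id_eq_of_perm_of_pairwise (l.erase h) t htperm hpair.of_cons]

-- Main correspondence: A's scan of the sorted list equals B's repeated min-selection.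
theorem loopA_eq_loopB (l : List Int) (j : Int) :
    pvLoopA (PySem.List.sorted l (fun x => x) false) j = pvLoopB l j := by
  induction hn : l.length using Nat.strong_induction_on generalizing l j with
  | _ n ih =>
    match l with
    | [] => simp [pvLoopA, pvLoopB, PySem.List.sorted]
    | x :: rest =>
      obtain ⟨m, hm⟩ : ∃ m, PySem.List.min? (x :: rest) (fun y => y) = some m := by
        rcases h : PySem.List.min? (x :: rest) (fun y => y) with _ | m
        · exact absurd ((PySem.List.min?_eq_none_iff _ _).mp h) (by simp)
        · exact ⟨m, rfl⟩
      have hm_mem : m ∈ (x :: rest) := PySem.List.min?_mem hm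
      rw [sorted_cons_min (x :: rest) m hm]
      rw [pvLoopB]
      simp only [hm, Option.getD_some]
      by_cases hmj : m = j
      · rw [pvLoopA, if_pos hmj, if_neg (by simp [hmj])]
        rw [PySem.List.remove?_eq_some_erase _ _ hm_mem, Option.getD_some]
        exact ih ((x :: rest).erase m).length
          (by rw [← hn]; have := List.length_erase_of_mem hm_mem; simp at this ⊢; omega)
          _ _ rfl
      · rw [pvLoopA, if_neg hmj, if_pos (by simp [hmj])]

-- ===== VERDICT =====
theorem getFirstMissingID_spec : Claim_equal_getFirstMissingID := by
  unfold Claim_equal_getFirstMissingID Spec_getFirstMissingID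
  intro ids _
  unfold getFirstMissingID getFirstMissingID_alt
  exact loopA_eq_loopB ids 0
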